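-- pv_equiv track=rewrite | github.com/ajnirp/binarysearch | vowels-consonants.py | solve
-- ===== SOURCE A (Python) =====
-- def solve(s):
--     vowels = []
--     consonants = []
--     for c in s:
--         if c in 'aeiou':
--             vowels.append(c)
--         else:
--             consonants.append(c)
--     return ''.join(sorted(vowels)) + ''.join(sorted(consonants))
-- ===== SOURCE B (Python) =====
-- def solve(s):
--     counts = {}
--     for c in s:
--         counts[c] = counts.get(c, 0) + 1
--     out = []
--     for v in 'aeiou':
--         out.append(v * counts.get(v, 0))
--     for i in range(128):
--         c = chr(i)
--         if c not in 'aeiou':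
--             out.append(c * counts.get(c, 0))
--     return ''.join(out)
-- ===== Notes on version B (the rewrite author's own statement) =====
-- stated objective: alternative
-- what changed: Replaces the two comparison sorts with a single counting pass (one dict of character counts) followed by emitting the five vowels and then the 128 ASCII codes in order, each repeated by its count.
import Mathlib
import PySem

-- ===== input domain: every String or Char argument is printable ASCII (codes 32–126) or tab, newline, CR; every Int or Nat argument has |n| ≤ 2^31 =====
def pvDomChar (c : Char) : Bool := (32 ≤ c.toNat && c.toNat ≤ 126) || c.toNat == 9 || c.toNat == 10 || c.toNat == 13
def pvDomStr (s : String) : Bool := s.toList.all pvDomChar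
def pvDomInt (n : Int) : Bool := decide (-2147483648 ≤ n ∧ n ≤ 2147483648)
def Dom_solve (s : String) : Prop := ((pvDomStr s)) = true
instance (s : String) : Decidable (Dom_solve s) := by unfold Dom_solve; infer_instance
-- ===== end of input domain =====

-- B replaces A's two comparison sorts by one counting pass over a dict and an in-order
-- emission of the fixed 128-character ASCII alphabet (a counting sort): a different algorithm.

-- ===== PORT A =====
def solve (s : String) : String :=
  let p := s.toList.foldl
    (fun (p : List Char × List Char) c =>
      if c ∈ "aeiou".toList then (p.1 ++ [c], p.2) else (p.1, p.2 ++ [c]))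
    ([], [])
  String.mk (PySem.List.sorted p.1 (fun x => x) false ++ PySem.List.sorted p.2 (fun x => x) false)

-- ===== PORT B =====
def solve_alt (s : String) : String :=
  let counts : PySem.Dict Char Int :=
    s.toList.foldl (fun d c => d.insert c (d.getD c 0 + 1)) PySem.Dict.empty
  let out1 := ("aeiou".toList.map (fun v => PySem.List.pyRepeat [v] (counts.getD v 0))).flatten
  let out2 := (((List.range 128).filter (fun i => !decide (Char.ofNat i ∈ "aeiou".toList))).map
      (fun i => PySem.List.pyRepeat [Char.ofNat i] (counts.getD (Char.ofNat i) 0))).flatten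
  String.mk (out1 ++ out2)

-- ===== PRECONDITION & SPEC =====
def Spec_solve (s : String) (out : String) : Prop := out = solve_alt s
instance (s : String) (out : String) : Decidable (Spec_solve s out) := by unfold Spec_solve; infer_instance

-- ===== CLAIM (what is proved, stated in full; the proofs are below) =====
def Claim_equal_solve : Prop := ∀ (s : String), Dom_solve s → Spec_solve s (solve s)

-- ===== LEMMAS AND PROOFS =====
set_option maxRecDepth 8000

-- A's loop splits the string into the vowels and the non-vowels, in order.
theorem pv_fold_partition (V l a b : List Char) :
    l.foldl (fun (p : List Char × List Char) c =>
      if c ∈ V then (p.1 ++ [c], p.2) else (p.1, p.2 ++ [c])) (a, b)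
    = (a ++ l.filter (fun c => decide (c ∈ V)),
       b ++ l.filter (fun c => !decide (c ∈ V))) := by
  induction l generalizing a b with
  | nil => simp
  | cons c t ih =>
    by_cases h : c ∈ V <;> simp [h, ih]

-- B's counting loop is a Counter.
theorem pv_counts_getD (l : List Char) (v : Char) :
    (l.foldl (fun d c => d.insert c (d.getD c 0 + 1)) PySem.Dict.empty).getD v 0
      = (l.count v : Int) := by
  rw [PySem.Dict.foldl_insert_getD_add_one_eq_counter, PySem.Dict.getD_counter]

-- occurrence count inside a flatten of replicate-blocks over distinct keys
theorem pv_count_blocks (ks : List Char) (n : Char → Nat) (hnd : ks.Nodup) (a : Char) :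
    ((ks.map (fun v => List.replicate (n v) v)).flatten.count a)
      = if a ∈ ks then n a else 0 := by
  induction ks with
  | nil => simp
  | cons v t ih =>
    rcases List.nodup_cons.mp hnd with ⟨hv, hnd'⟩
    by_cases h : a = v
    · subst h
      simp [List.count_append, ih hnd', hv]
    · simp [List.count_append, List.count_replicate, ih hnd', h, Ne.symm h]

-- a flatten of replicate-blocks over a ≤-ordered key list is ≤-ordered
theorem pv_pairwise_blocks (ks : List Char) (n : Char → Nat)
    (hpw : ks.Pairwise (· ≤ ·)) :
    ((ks.map (fun v => List.replicate (n v) v)).flatten.Pairwise (· ≤ ·)) := by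
  induction ks with
  | nil => simp
  | cons v t ih =>
    rcases List.pairwise_cons.mp hpw with ⟨hv, hpw'⟩
    simp only [List.map_cons, List.flatten_cons]
    rw [List.pairwise_append]
    refine ⟨List.pairwise_replicate.mpr (Or.inr le_rfl), ih hpw', ?_⟩
    intro x hx y hy
    rcases List.eq_of_mem_replicate hx with rfl
    rcases List.mem_flatten.mp hy with ⟨blk, hblk, hyblk⟩
    rcases List.mem_map.mp hblk with ⟨w, hw, rfl⟩
    rcases List.eq_of_mem_replicate hyblk with rfl
    exact hv _ hw

-- the consonant key list of B, as characters
def pvKs : List Char :=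
  ((List.range 128).filter (fun i => !decide (Char.ofNat i ∈ "aeiou".toList))).map Char.ofNat

theorem pvKs_nodup : pvKs.Nodup := by decide

theorem pvKs_pairwise : pvKs.Pairwise (· ≤ ·) := by decide

theorem pvKs_all : pvKs.all (fun x => decide (x.toNat < 128) && !decide (x ∈ "aeiou".toList)) = true := by
  decide

theorem pvKs_fwd : ∀ x ∈ pvKs, x.toNat < 128 ∧ ¬ x ∈ "aeiou".toList := by
  intro x hx
  have := List.all_eq_true.mp pvKs_all x hx
  simp only [Bool.and_eq_true, decide_eq_true_eq, Bool.not_eq_true', decide_eq_false_iff_not]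
    at this
  exact this

theorem pvKs_mem (a : Char) (h128 : a.toNat < 128) (hv : ¬ a ∈ "aeiou".toList) : a ∈ pvKs := by
  unfold pvKs
  refine List.mem_map.mpr ⟨a.toNat, List.mem_filter.mpr ⟨List.mem_range.mpr h128, ?_⟩,
    Char.ofNat_toNat a⟩
  rw [Char.ofNat_toNat a]
  simpa using hv

theorem pv_sorted_blocks (xs ks : List Char) (n : Char → Nat) (hnd : ks.Nodup)
    (hpw : ks.Pairwise (· ≤ ·))
    (hcnt : ∀ a : Char, (if a ∈ ks then n a else 0) = xs.count a) :
    PySem.List.sorted xs (fun x => x) false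
      = (ks.map (fun v => List.replicate (n v) v)).flatten := by
  refine PySem.List.sorted_id_eq_of_perm_of_pairwise xs _ ?_ (pv_pairwise_blocks ks _ hpw)
  refine List.perm_iff_count.mpr (fun a => ?_)
  rw [pv_count_blocks ks _ hnd a, hcnt a]

theorem pv_count_filter_eq (l : List Char) (p : Char → Bool) (a : Char) (h : p a = true) :
    (l.filter p).count a = l.count a := List.count_filter h

theorem pv_count_filter_zero (l : List Char) (p : Char → Bool) (a : Char) (h : p a = false) :
    (l.filter p).count a = 0 := by
  refine List.count_eq_zero.mpr (fun hmem => ?_)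
  have := (List.mem_filter.mp hmem).2
  simp [h] at this

-- ===== VERDICT (by name: the statement is the Claim_ definition above) =====
theorem solve_spec : Claim_equal_solve := by
  intro s hdom
  have hlt : ∀ c ∈ s.toList, c.toNat < 128 := by
    intro c hc
    have := List.all_eq_true.mp hdom c hc
    simp only [pvDomChar, Bool.or_eq_true, Bool.and_eq_true, decide_eq_true_eq, beq_iff_eq]
      at this
    omega
  unfold Spec_solve solve solve_alt
  simp only [pv_fold_partition, List.nil_append]
  set l := s.toList with hl
  congr 1
  have hrep : ∀ (v : Char),
      PySem.List.pyRepeat [v]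
        ((l.foldl (fun d c => d.insert c (d.getD c 0 + 1)) PySem.Dict.empty).getD v 0)
      = List.replicate (l.count v) v := by
    intro v
    rw [pv_counts_getD]
    simp [PySem.List.pyRepeat_singleton]
  congr 1
  · -- vowels
    have hnd : ("aeiou".toList).Nodup := by decide
    have hpw : ("aeiou".toList).Pairwise (· ≤ ·) := by decide
    rw [funext hrep]
    refine pv_sorted_blocks _ _ _ hnd hpw (fun a => ?_)
    by_cases h : a ∈ "aeiou".toList
    · rw [if_pos h, pv_count_filter_eq l _ a (by simpa using h)]
    · rw [if_neg h, pv_count_filter_zero l _ a (by simpa using h)]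
  · -- consonants
    have hnd := pvKs_nodup
    have hpw := pvKs_pairwise
    have hfwd := pvKs_fwd
    have hmapmap :
        ((List.range 128).filter (fun i => !decide (Char.ofNat i ∈ "aeiou".toList))).map
          (fun i => PySem.List.pyRepeat [Char.ofNat i]
            ((l.foldl (fun d c => d.insert c (d.getD c 0 + 1)) PySem.Dict.empty).getD
              (Char.ofNat i) 0))
        = pvKs.map (fun v => List.replicate (l.count v) v) := by
      unfold pvKs
      rw [List.map_map]
      exact List.map_congr_left (fun i _ => hrep (Char.ofNat i))
    rw [hmapmap]
    refine pv_sorted_blocks _ _ _ hnd hpw (fun a => ?_)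
    by_cases h : a ∈ pvKs
    · obtain ⟨_, hav⟩ := hfwd a h
      rw [if_pos h, pv_count_filter_eq l _ a (by simpa using hav)]
    · rw [if_neg h]
      by_cases hav : a ∈ "aeiou".toList
      · refine Eq.symm (pv_count_filter_zero l _ a ?_)
        show (!decide (a ∈ "aeiou".toList)) = false
        rw [decide_eq_true hav]
        rfl
      · -- a is a non-vowel not in pvKs: then a.toNat ≥ 128, so a does not occur in l at all
        have h128 : ¬ a.toNat < 128 := fun hh => h (pvKs_mem a hh hav)
        have hnotmem : a ∉ l.filter (fun c => !decide (c ∈ "aeiou".toList)) := by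
          intro hmem
          exact h128 (hlt a (List.mem_filter.mp hmem).1)
        rw [List.count_eq_zero.mpr hnotmem]
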